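-- pv_equiv track=rewrite | github.com/Lab00700/Algorithm | 프로그래머스/0/181851. 전국 대회 선발 고사/전국 대회 선발 고사.py | solution
-- ===== SOURCE A (Python) =====
-- def solution(rank, attendance):
--     m=max(rank)
--     for i in range(len(rank)):
--         if not attendance[i]:
--             rank[i]=m+1
--     a=rank.index(min(rank))*10000
--     rank[rank.index(min(rank))]=m+1
--     b=rank.index(min(rank))*100
--     rank[rank.index(min(rank))]=m+1
--     c=rank.index(min(rank))
--
--     return a+b+c
-- ===== SOURCE B (Python) =====
-- def solution(rank, attendance):
--     # one sort of the attending (rank, index) pairs instead of A's repeated min/index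
--     # scans; slots beyond the attendee count come out as index 0, exactly like A's
--     # leftover sentinel scans. Computes the return value only (does not mutate rank).
--     order = sorted((r, i) for i, r in enumerate(rank) if attendance[i])
--     top = [i for _, i in order[:3]]
--     top += [0] * (3 - len(top))
--     return top[0] * 10000 + top[1] * 100 + top[2]
-- ===== Notes on version B (the rewrite author's own statement) =====
-- stated objective: alternative
-- what changed: Replaces A's mark-then-three-repeated-min/index scans (with in-place sentinel writes into rank) by one sort of the attending (rank, index) pairs, reading the winners off the sorted prefix (padded with index 0 exactly as A's leftover sentinel scans yield index 0 when fewer than three attend); B computes the return value only and does not mutate rank.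
import Mathlib
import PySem

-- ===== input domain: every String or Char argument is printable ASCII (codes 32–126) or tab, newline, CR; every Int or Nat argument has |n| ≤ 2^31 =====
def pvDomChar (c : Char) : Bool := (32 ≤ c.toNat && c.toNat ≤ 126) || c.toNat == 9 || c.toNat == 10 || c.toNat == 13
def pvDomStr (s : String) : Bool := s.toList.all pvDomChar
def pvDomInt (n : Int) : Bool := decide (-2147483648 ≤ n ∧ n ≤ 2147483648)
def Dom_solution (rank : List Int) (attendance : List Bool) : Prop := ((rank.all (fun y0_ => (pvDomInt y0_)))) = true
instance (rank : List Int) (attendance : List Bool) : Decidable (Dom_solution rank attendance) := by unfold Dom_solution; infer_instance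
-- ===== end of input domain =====

-- B replaces A's mark-then-three-repeated-min/index scans by one sort of the attending
-- (rank, index) pairs (objective: alternative); equivalence is about the RETURN value only —
-- Python A mutates rank in place, B does not.

-- ===== PORT A =====
def solution (rank : List Int) (attendance : List Bool) : Int :=
  match PySem.List.max? rank (fun y => y) with
  | none => 0
  | some m =>
    let r1 := (PySem.List.pyRange 0 rank.length 1).foldl
      (fun r i => if ((PySem.List.pyGet? attendance i).getD true) = false
                  then PySem.List.pySetD r i (m+1) else r) rank
    let i1 : Nat := (PySem.List.index? r1 ((PySem.List.min? r1 (fun y => y)).getD 0)).getD 0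
    let a : Int := (i1 : Int) * 10000
    let r2 := r1.set i1 (m+1)
    let i2 : Nat := (PySem.List.index? r2 ((PySem.List.min? r2 (fun y => y)).getD 0)).getD 0
    let b : Int := (i2 : Int) * 100
    let r3 := r2.set i2 (m+1)
    let i3 : Nat := (PySem.List.index? r3 ((PySem.List.min? r3 (fun y => y)).getD 0)).getD 0
    a + b + (i3 : Int)

-- ===== PORT B =====
def solution_alt (rank : List Int) (attendance : List Bool) : Int :=
  let order := PySem.List.sorted2
      (((PySem.List.enumerate rank 0).filter
          (fun p => (PySem.List.pyGet? attendance p.1).getD false)).map (fun p => (p.2, p.1)))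
      (fun q => q.1) (fun q => q.2) false
  let top := (PySem.List.slice order none (some 3)).map (fun p => p.2)
  let top2 := top ++ PySem.List.pyRepeat [0] (3 - (top.length : Int))
  ((PySem.List.pyGet? top2 0).getD 0) * 10000
    + ((PySem.List.pyGet? top2 1).getD 0) * 100
    + ((PySem.List.pyGet? top2 2).getD 0)

-- ===== PRECONDITION & SPEC =====
-- Pre_ excludes exactly the inputs on which A raises: an empty rank (ValueError from max;
-- B returns 0 there) and attendance shorter than rank (IndexError in the marking loop).
def Pre_solution (rank : List Int) (attendance : List Bool) : Prop :=
  rank ≠ [] ∧ rank.length ≤ attendance.length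
instance (rank : List Int) (attendance : List Bool) : Decidable (Pre_solution rank attendance) := by
  unfold Pre_solution; infer_instance

def pvWitness_solution : List Int × List Bool := ([3, 1, 2], [true, true, true])

def Spec_solution (rank : List Int) (attendance : List Bool) (out : Int) : Prop :=
  out = solution_alt rank attendance
instance (rank : List Int) (attendance : List Bool) (out : Int) : Decidable (Spec_solution rank attendance out) := by
  unfold Spec_solution; infer_instance

-- ===== CLAIM (what is proved, stated in full; the proofs are below) =====
def Claim_equal_solution : Prop := ∀ (rank : List Int) (attendance : List Bool),
  Dom_solution rank attendance → Pre_solution rank attendance →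
    Spec_solution rank attendance (solution rank attendance)
-- ===== LEMMAS AND PROOFS =====

def lowPairs (B : Int) : List Int → Int → List (Int × Int)
  | [], _ => []
  | x :: xs, j => if x < B then (x, j) :: lowPairs B xs (j + 1) else lowPairs B xs (j + 1)

theorem mem_lowPairs (B : Int) : ∀ (r : List Int) (j : Int) (p : Int × Int),
    p ∈ lowPairs B r j ↔ ∃ (t : Nat), ∃ (ht : t < r.length), p = (r[t], j + t) ∧ r[t] < B := by
  intro r
  induction r with
  | nil => intro j p; simp [lowPairs]
  | cons x xs ih =>
    intro j p
    constructor
    · intro hp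
      by_cases hx : x < B
      · simp only [lowPairs, if_pos hx, List.mem_cons] at hp
        rcases hp with rfl | hp
        · exact ⟨0, by simp, by simp, hx⟩
        · rcases (ih (j+1) p).1 hp with ⟨t, ht, hpe, hlt⟩
          refine ⟨t+1, by simpa using ht, ?_, by simpa using hlt⟩
          simp only [List.getElem_cons_succ] at *
          rw [hpe]; congr 1; push_cast; ring
      · simp only [lowPairs, if_neg hx] at hp
        rcases (ih (j+1) p).1 hp with ⟨t, ht, hpe, hlt⟩
        refine ⟨t+1, by simpa using ht, ?_, by simpa using hlt⟩
        simp only [List.getElem_cons_succ] at *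
        rw [hpe]; congr 1; push_cast; ring
    · rintro ⟨t, ht, rfl, hlt⟩
      cases t with
      | zero =>
        simp only [List.getElem_cons_zero] at hlt ⊢
        simp [lowPairs, if_pos hlt]
      | succ t =>
        have ht' : t < xs.length := by simpa using ht
        have : ((xs[t], (j+1) + (t:Int)) : Int × Int) ∈ lowPairs B xs (j+1) := by
          rw [ih]
          exact ⟨t, ht', rfl, by simpa using hlt⟩
        have heq : ((j+1) + (t:Int)) = j + ((t+1 : Nat) : Int) := by push_cast; ring
        by_cases hx : x < B
        · simp only [lowPairs, if_pos hx, List.mem_cons]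
          right
          simpa [List.getElem_cons_succ, heq] using this
        · simp only [lowPairs, if_neg hx]
          simpa [List.getElem_cons_succ, heq] using this

theorem lowPairs_set_erase (B : Int) : ∀ (r : List Int) (j : Int) (t : Nat) (ht : t < r.length),
    r[t] < B →
    lowPairs B (r.set t B) j = (lowPairs B r j).erase (r[t], j + t) := by
  intro r
  induction r with
  | nil => intro j t ht; simp at ht
  | cons x xs ih =>
    intro j t ht hlt
    cases t with
    | zero =>
      simp only [List.getElem_cons_zero] at hlt ⊢
      simp only [List.set_cons_zero, lowPairs, if_pos hlt, if_neg (lt_irrefl B)]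
      have : (j + ((0:Nat):Int)) = j := by push_cast; ring
      rw [this, List.erase_cons_head]
    | succ t =>
      have ht' : t < xs.length := by simpa using ht
      have hlt' : xs[t] < B := by simpa using hlt
      simp only [List.set_cons_succ, List.getElem_cons_succ]
      have heq : j + ((t+1 : Nat) : Int) = (j+1) + (t:Int) := by push_cast; ring
      by_cases hx : x < B
      · simp only [lowPairs, if_pos hx]
        rw [List.erase_cons_tail]
        · rw [ih (j+1) t ht' hlt', heq]
        · simp only [beq_iff_eq]
          intro hcon
          have := congrArg Prod.snd hcon
          simp at this
          omega
      · simp only [lowPairs, if_neg hx]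
        rw [ih (j+1) t ht' hlt', heq]

theorem foldlSet_getElem? (att : List Bool) (v : Int) :
    ∀ (l : List Int) (r : List Int), (∀ i ∈ l, 0 ≤ i) → ∀ (k : Nat),
    ((l.foldl (fun r i => if ((PySem.List.pyGet? att i).getD true) = false
                  then PySem.List.pySetD r i v else r) r))[k]?
      = if ((k : Int) ∈ l ∧ ((PySem.List.pyGet? att (k : Int)).getD true) = false ∧ k < r.length)
        then some v else r[k]? := by
  intro l
  induction l with
  | nil => intro r _ k; simp
  | cons i l' ih =>
    intro r hnn k
    have hi : 0 ≤ i := hnn i (by simp)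
    simp only [List.foldl_cons]
    set r' := (if ((PySem.List.pyGet? att i).getD true) = false
                  then PySem.List.pySetD r i v else r) with hr'
    have hlen : r'.length = r.length := by
      by_cases hc : ((PySem.List.pyGet? att i).getD true) = false
      · simp [hr', hc, PySem.List.length_pySetD]
      · simp [hr', hc]
    rw [ih r' (fun x hx => hnn x (by simp [hx])) k, hlen]
    by_cases h1 : (k : Int) ∈ l' ∧ ((PySem.List.pyGet? att (k : Int)).getD true) = false ∧ k < r.length
    · rw [if_pos h1, if_pos ⟨by simp [h1.1], h1.2⟩]
    · rw [if_neg h1]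
      by_cases hik : (k : Int) = i
      · subst hik
        have htn : (k : Int).toNat = k := by omega
        by_cases hc : ((PySem.List.pyGet? att (k : Int)).getD true) = false
        · by_cases hk : k < r.length
          · rw [if_pos ⟨by simp, hc, hk⟩]
            simp only [hr', if_pos hc]
            rw [PySem.List.pySetD_of_nonneg _ _ hi, htn]
            simp [hk]
          · rw [if_neg (by tauto)]
            simp only [hr', if_pos hc]
            rw [PySem.List.pySetD_of_nonneg _ _ hi, htn]
            rw [List.getElem?_set]
            simp [hk]
        · rw [if_neg (by tauto)]
          simp only [hr', if_neg hc]
      · have : ¬ ((k:Int) ∈ (i :: l') ∧ ((PySem.List.pyGet? att (k : Int)).getD true) = false ∧ k < r.length) := by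
          intro hcon
          rcases hcon with ⟨hm, hrest⟩
          rcases List.mem_cons.1 hm with h | h
          · exact hik h
          · exact h1 ⟨h, hrest⟩
        rw [if_neg this]
        by_cases hc : ((PySem.List.pyGet? att i).getD true) = false
        · simp only [hr', if_pos hc]
          rw [PySem.List.pySetD_of_nonneg _ _ hi]
          rw [List.getElem?_set_ne]
          omega
        · simp [hr', hc]

theorem mark_eq_zipWith (rank : List Int) (att : List Bool) (v : Int)
    (hlen : rank.length ≤ att.length) :
    ((PySem.List.pyRange 0 rank.length 1).foldl
      (fun r i => if ((PySem.List.pyGet? att i).getD true) = false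
                  then PySem.List.pySetD r i v else r) rank)
      = List.zipWith (fun x a => if a then x else v) rank att := by
  have hnn : ∀ i ∈ PySem.List.pyRange 0 rank.length 1, (0:Int) ≤ i := by
    intro i hi
    exact ((PySem.List.mem_pyRange_one).1 hi).1
  apply List.ext_getElem?
  intro k
  rw [foldlSet_getElem? att v _ rank hnn k]
  by_cases hk : k < rank.length
  · have hka : k < att.length := lt_of_lt_of_le hk hlen
    have hmem : (k:Int) ∈ PySem.List.pyRange 0 rank.length 1 := by
      rw [PySem.List.mem_pyRange_one]; omega
    have hget : (PySem.List.pyGet? att (k:Int)).getD true = att[k] := by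
      rw [PySem.List.pyGet?_natCast]
      simp [List.getElem?_eq_getElem, hka]
    have hz : (List.zipWith (fun x a => if a then x else v) rank att)[k]?
        = some (if att[k] then rank[k] else v) := by
      rw [List.getElem?_zipWith]
      · simp [List.getElem?_eq_getElem, hk, hka]
    rw [hz]
    by_cases hatt : att[k] = false
    · rw [if_pos ⟨hmem, by rw [hget]; exact hatt, hk⟩]
      simp [hatt]
    · have hatt' : att[k] = true := by revert hatt; cases att[k] <;> simp
      rw [if_neg (by rw [hget]; tauto)]
      simp [hatt', List.getElem?_eq_getElem, hk]
  · rw [if_neg (by tauto)]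
    have h1 : rank[k]? = none := by simp [List.getElem?_eq_none_iff]; omega
    have h2 : (List.zipWith (fun x a => if a then x else v) rank att)[k]? = none := by
      simp [List.getElem?_eq_none_iff, List.length_zipWith]; omega
    rw [h1, h2]

theorem enumFilter_eq_lowPairs (B : Int) (att : List Bool) :
    ∀ (rs : List Int) (j : Nat), (j + rs.length ≤ att.length) → (∀ x ∈ rs, x < B) →
    ((PySem.List.enumerate rs (j : Int)).filter
        (fun p => (PySem.List.pyGet? att p.1).getD false)).map (fun p => (p.2, p.1))
      = lowPairs B (List.zipWith (fun x a => if a then x else B) rs (att.drop j)) (j : Int) := by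
  intro rs
  induction rs with
  | nil => intro j _ _; simp [PySem.List.enumerate_nil, lowPairs]
  | cons x xs ih =>
    intro j hj hub
    have hja : j < att.length := by simp at hj; omega
    have hdrop : att.drop j = att[j] :: att.drop (j+1) := List.drop_eq_getElem_cons hja
    have hx : x < B := hub x (by simp)
    have hget : (PySem.List.pyGet? att ((j:Nat) : Int)).getD false = att[j] := by
      rw [PySem.List.pyGet?_natCast]
      simp [List.getElem?_eq_getElem, hja]
    have ihx := ih (j+1) (by simp at hj ⊢; omega) (fun y hy => hub y (by simp [hy]))
    rw [hdrop]
    rw [PySem.List.enumerate_cons]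
    by_cases hatt : att[j] = true
    · rw [List.filter_cons_of_pos (by rw [hget, hatt])]
      simp only [List.map_cons, List.zipWith_cons_cons, hatt, if_true, lowPairs, if_pos hx]
      have : ((j:Int) + 1) = (((j+1 : Nat)) : Int) := by push_cast; ring
      rw [this, ihx]
    · have hatt' : att[j] = false := by revert hatt; cases att[j] <;> simp
      rw [List.filter_cons_of_neg (by rw [hget, hatt']; simp)]
      have : ((j:Int) + 1) = (((j+1 : Nat)) : Int) := by push_cast; ring
      simp only [List.zipWith_cons_cons, hatt', lowPairs]
      rw [if_neg (by simp), this, ihx]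

theorem sorted2_eq_sorted_lex (xs : List (Int × Int)) :
    PySem.List.sorted2 xs (fun q => q.1) (fun q => q.2) false
      = PySem.List.sorted xs (fun p => (toLex p : Int ×ₗ Int)) false := by
  have hbf : (fun (a b : Int × Int) => decide (a.1 < b.1) || (!decide (b.1 < a.1) && decide (a.2 < b.2)))
      = (fun (a b : Int × Int) => decide ((toLex a : Int ×ₗ Int) < toLex b)) := by
    funext a b
    by_cases h1 : a.1 < b.1 <;> by_cases h2 : b.1 < a.1 <;> by_cases h3 : a.2 < b.2 <;>
      simp [h1, h2, h3, Prod.Lex.lt_iff] <;> omega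
  show List.foldl (fun acc x => PySem.List.insertBy
      (fun a b => decide (a.1 < b.1) || (!decide (b.1 < a.1) && decide (a.2 < b.2))) x acc) [] xs
    = List.foldl (fun acc x => PySem.List.insertBy
      (fun a b => decide ((toLex a : Int ×ₗ Int) < toLex b)) x acc) [] xs
  rw [hbf]

theorem peel (l xs : List (Int × Int))
    (hperm : l.Perm xs)
    (hpw : l.Pairwise (fun a b => (toLex a : Int ×ₗ Int) ≤ toLex b))
    (hne : xs ≠ []) :
    ∃ q t, l = q :: t ∧ q ∈ xs ∧ (∀ z ∈ xs, z ≠ q → (toLex q : Int ×ₗ Int) < toLex z)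
      ∧ t.Perm (xs.erase q) ∧ t.Pairwise (fun a b => (toLex a : Int ×ₗ Int) ≤ toLex b) := by
  cases l with
  | nil =>
    exact absurd (hperm.nil_eq).symm hne
  | cons q t =>
    refine ⟨q, t, rfl, hperm.subset (by simp), ?_, ?_, (List.pairwise_cons.1 hpw).2⟩
    · intro z hz hzq
      have hzl : z ∈ q :: t := hperm.symm.subset hz
      rcases List.mem_cons.1 hzl with h | h
      · exact absurd h hzq
      · have hle := (List.pairwise_cons.1 hpw).1 z h
        exact lt_of_le_of_ne hle (fun hc => hzq (toLex.injective hc).symm)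
    · exact (List.cons_perm_iff_perm_erase.1 hperm).2

theorem selRound (B : Int) (r : List Int) (q : Int × Int)
    (hub : ∀ x ∈ r, x ≤ B)
    (hmem : q ∈ lowPairs B r 0)
    (hmin : ∀ z ∈ lowPairs B r 0, z ≠ q → (toLex q : Int ×ₗ Int) < toLex z) :
    PySem.List.min? r (fun y => y) = some q.1 ∧
    PySem.List.index? r q.1 = some q.2.toNat ∧
    lowPairs B (r.set q.2.toNat B) 0 = (lowPairs B r 0).erase q ∧
    0 ≤ q.2 := by
  rcases (mem_lowPairs B r 0 q).1 hmem with ⟨t, ht, hq, hlt⟩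
  have hq1 : q.1 = r[t] := by rw [hq]
  have hq2 : q.2 = (t : Int) := by rw [hq]; simp
  have hq2n : q.2.toNat = t := by rw [hq2]; simp
  -- q.1 is a lower bound of r
  have hlb : ∀ y ∈ r, q.1 ≤ y := by
    intro y hy
    rcases List.mem_iff_getElem.1 hy with ⟨k, hk, rfl⟩
    by_cases hyB : r[k] < B
    · have hp : ((r[k], ((0:Int) + k)) : Int × Int) ∈ lowPairs B r 0 :=
        (mem_lowPairs B r 0 _).2 ⟨k, hk, rfl, hyB⟩
      by_cases hpq : ((r[k], ((0:Int) + k)) : Int × Int) = q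
      · rw [← hpq]
      · have := hmin _ hp hpq
        rw [Prod.Lex.lt_iff] at this
        rcases this with h | ⟨h, _⟩
        · exact le_of_lt h
        · exact le_of_eq h
    · have : q.1 < B := by rw [hq1]; exact hlt
      omega
  -- no earlier occurrence of q.1
  have hfirst : ∀ j, j < t → ∀ (hj : j < r.length), r[j] ≠ q.1 := by
    intro j hjt hj hcon
    have hjB : r[j] < B := by rw [hcon, hq1]; exact hlt
    have hp : ((r[j], ((0:Int) + j)) : Int × Int) ∈ lowPairs B r 0 :=
      (mem_lowPairs B r 0 _).2 ⟨j, hj, rfl, hjB⟩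
    have hpq : ((r[j], ((0:Int) + j)) : Int × Int) ≠ q := by
      intro hcon2
      have := congrArg Prod.snd hcon2
      simp [hq2] at this
      omega
    have := hmin _ hp hpq
    rw [Prod.Lex.lt_iff] at this
    simp [hq2, hq1, hcon] at this
    omega
  refine ⟨?_, ?_, ?_, by rw [hq2]; positivity⟩
  · -- min?
    cases r with
    | nil => simp at ht
    | cons x rest =>
      rw [PySem.List.min?_id_cons]
      have h1 := PySem.List.foldl_min_le rest x
      have hmem' : List.foldl min x rest ∈ (x :: rest) := by
        rcases PySem.List.foldl_min_mem rest x with h | h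
        · simp [h]
        · simp [h]
      have hle1 : q.1 ≤ List.foldl min x rest := hlb _ hmem'
      have hle2 : List.foldl min x rest ≤ q.1 := by
        have hq1mem : q.1 ∈ (x :: rest) := by
          rw [hq1]; exact List.getElem_mem ht
        rcases List.mem_cons.1 hq1mem with h | h
        · rw [h]; exact h1.1
        · exact h1.2 _ h
      rw [le_antisymm hle1 hle2]
  · -- index?
    rw [hq2n, PySem.List.index?_eq_some_iff]
    refine ⟨r.take t, r.drop (t+1), ?_, by simp [ht.le], ?_⟩
    · rw [hq1]
      conv_lhs => rw [← List.take_append_drop t r]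
      rw [List.drop_eq_getElem_cons ht]
    · intro hcon
      rcases List.mem_take_iff_getElem.1 hcon with ⟨j, hj, hje⟩
      exact hfirst j (by omega) (by omega) hje
  · rw [hq2n, lowPairs_set_erase B r 0 t ht hlt, hq]



-- a round of A after all attending entries are exhausted: everything equals B, index 0 is picked
theorem exhaustRound (B : Int) (r : List Int) (hne : r ≠ [])
    (hub : ∀ x ∈ r, x ≤ B) (hlow : lowPairs B r 0 = []) :
    PySem.List.min? r (fun y => y) = some B ∧
    PySem.List.index? r B = some 0 ∧ r.set 0 B = r := by
  have hall : ∀ (k : Nat) (hk : k < r.length), r[k] = B := by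
    intro k hk
    have h1 : r[k] ≤ B := hub _ (List.getElem_mem _)
    by_contra hcon
    have : ((r[k], ((0:Int) + k)) : Int × Int) ∈ lowPairs B r 0 :=
      (mem_lowPairs B r 0 _).2 ⟨k, hk, rfl, by omega⟩
    rw [hlow] at this
    simp at this
  cases r with
  | nil => exact absurd rfl hne
  | cons x rest =>
    have hx : x = B := by have := hall 0 (by simp); simpa using this
    refine ⟨?_, ?_, by rw [hx]; simp⟩
    · rw [PySem.List.min?_id_cons]
      congr 1
      rw [hx]
      rcases PySem.List.foldl_min_mem rest B with h | h
      · exact h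
      · rcases List.mem_iff_getElem.1 h with ⟨k, hk, hkk⟩
        rw [← hkk]
        have := hall (k+1) (by simpa using hk)
        simpa using this
    · rw [hx, PySem.List.index?_cons_self]

theorem main (rank : List Int) (att : List Bool)
    (hne : rank ≠ []) (hlen : rank.length ≤ att.length) :
    solution rank att = solution_alt rank att := by
  obtain ⟨m, hmax⟩ : ∃ m, PySem.List.max? rank (fun y => y) = some m := by
    rcases List.exists_cons_of_ne_nil hne with ⟨x, xs, hx⟩
    exact ⟨_, by rw [hx, PySem.List.max?_id_cons]⟩
  have hub : ∀ y ∈ rank, y ≤ m := PySem.List.max?_isMax hmax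
  set B : Int := m + 1 with hB
  have hubB : ∀ y ∈ rank, y < B := fun y hy => by have := hub y hy; omega
  have hrl : 0 < rank.length := List.length_pos_of_ne_nil hne
  -- the masked list
  set r1 : List Int := List.zipWith (fun x a => if a then x else B) rank att with hr1
  have hmark : ((PySem.List.pyRange 0 rank.length 1).foldl
      (fun r i => if ((PySem.List.pyGet? att i).getD true) = false
                  then PySem.List.pySetD r i B else r) rank) = r1 :=
    mark_eq_zipWith rank att B hlen
  have hub1 : ∀ y ∈ r1, y ≤ B := by
    intro y hy
    rw [hr1] at hy
    rcases List.mem_iff_getElem.1 hy with ⟨k, hk, rfl⟩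
    rw [List.getElem_zipWith]
    split
    · exact hub _ (List.getElem_mem _) |>.trans (by omega)
    · exact le_refl B
  have hlen1 : r1.length = rank.length := by
    rw [hr1, List.length_zipWith]
    omega
  have hne1 : r1 ≠ [] := by
    intro h
    rw [h] at hlen1
    simp at hlen1
    omega
  -- B's pair list is lowPairs of the masked list
  set Plow : List (Int × Int) := lowPairs B r1 0 with hPlow
  have hpairs : ((PySem.List.enumerate rank 0).filter
        (fun p => (PySem.List.pyGet? att p.1).getD false)).map (fun p => (p.2, p.1)) = Plow := by
    have := enumFilter_eq_lowPairs B att rank 0 (by omega) hubB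
    simpa using this
  have hsorted : PySem.List.sorted2 (((PySem.List.enumerate rank 0).filter
        (fun p => (PySem.List.pyGet? att p.1).getD false)).map (fun p => (p.2, p.1)))
        (fun q => q.1) (fun q => q.2) false
      = PySem.List.sorted Plow (fun p => (toLex p : Int ×ₗ Int)) false := by
    rw [hpairs, sorted2_eq_sorted_lex]
  by_cases h3 : 3 ≤ Plow.length
  · -- at least three attendees: three ordinary rounds
    obtain ⟨q1, t1, hs1, hq1mem, hq1min, ht1perm, ht1pw⟩ :=
      peel (PySem.List.sorted Plow (fun p => (toLex p : Int ×ₗ Int)) false) Plow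
        (PySem.List.sorted_perm Plow _ false) (PySem.List.sorted_pairwise Plow _)
        (by intro h; rw [h] at h3; simp at h3)
    obtain ⟨hmin1, hidx1, herase1, hq1pos⟩ := selRound B r1 q1 hub1 hq1mem hq1min
    set r2 : List Int := r1.set q1.2.toNat B with hr2
    have hub2 : ∀ y ∈ r2, y ≤ B := by
      intro y hy
      rcases List.mem_or_eq_of_mem_set hy with h | rfl
      · exact hub1 y h
      · exact le_refl B
    have hP1len : 2 ≤ (Plow.erase q1).length := by
      rw [List.length_erase_of_mem hq1mem]; omega
    obtain ⟨q2, t2, hs2, hq2mem, hq2min, ht2perm, ht2pw⟩ :=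
      peel t1 (Plow.erase q1) ht1perm ht1pw
        (by intro h; rw [h] at hP1len; simp at hP1len)
    obtain ⟨hmin2, hidx2, herase2, hq2pos⟩ := selRound B r2 q2 hub2
      (by rw [herase1]; exact hq2mem)
      (by rw [herase1]; exact hq2min)
    set r3 : List Int := r2.set q2.2.toNat B with hr3
    have hub3 : ∀ y ∈ r3, y ≤ B := by
      intro y hy
      rcases List.mem_or_eq_of_mem_set hy with h | rfl
      · exact hub2 y h
      · exact le_refl B
    have hP2len : 1 ≤ ((Plow.erase q1).erase q2).length := by
      rw [List.length_erase_of_mem hq2mem]; omega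
    obtain ⟨q3, t3, hs3, hq3mem, hq3min, ht3perm, ht3pw⟩ :=
      peel t2 ((Plow.erase q1).erase q2) ht2perm ht2pw
        (by intro h; rw [h] at hP2len; simp at hP2len)
    obtain ⟨hmin3, hidx3, herase3, hq3pos⟩ := selRound B r3 q3 hub3
      (by rw [herase2, herase1]; exact hq3mem)
      (by rw [herase2, herase1]; exact hq3min)
    have hA : solution rank att
        = (q1.2.toNat : Int) * 10000 + (q2.2.toNat : Int) * 100 + (q3.2.toNat : Int) := by
      simp only [solution, hmax]
      rw [hmark, hmin1]
      simp only [Option.getD_some]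
      rw [hidx1]
      simp only [Option.getD_some]
      rw [← hr2, hmin2]
      simp only [Option.getD_some]
      rw [hidx2]
      simp only [Option.getD_some]
      rw [← hr3, hmin3]
      simp only [Option.getD_some]
      rw [hidx3]
      simp only [Option.getD_some]
    have hB' : solution_alt rank att = q1.2 * 10000 + q2.2 * 100 + q3.2 := by
      simp only [solution_alt]
      rw [hsorted, hs1, hs2, hs3]
      rw [PySem.List.slice_to _ (by norm_num : (0:Int) ≤ 3)]
      simp [PySem.List.pyRepeat_singleton, PySem.List.pyGet?, PySem.List.pyIdx?]
    rw [hA, hB', Int.toNat_of_nonneg hq1pos, Int.toNat_of_nonneg hq2pos, Int.toNat_of_nonneg hq3pos]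
  · by_cases h2 : Plow.length = 2
    · -- exactly two attendees
      obtain ⟨q1, t1, hs1, hq1mem, hq1min, ht1perm, ht1pw⟩ :=
        peel (PySem.List.sorted Plow (fun p => (toLex p : Int ×ₗ Int)) false) Plow
          (PySem.List.sorted_perm Plow _ false) (PySem.List.sorted_pairwise Plow _)
          (by intro h; rw [h] at h2; simp at h2)
      obtain ⟨hmin1, hidx1, herase1, hq1pos⟩ := selRound B r1 q1 hub1 hq1mem hq1min
      set r2 : List Int := r1.set q1.2.toNat B with hr2
      have hub2 : ∀ y ∈ r2, y ≤ B := by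
        intro y hy
        rcases List.mem_or_eq_of_mem_set hy with h | rfl
        · exact hub1 y h
        · exact le_refl B
      have hP1len : (Plow.erase q1).length = 1 := by
        rw [List.length_erase_of_mem hq1mem]; omega
      obtain ⟨q2, t2, hs2, hq2mem, hq2min, ht2perm, ht2pw⟩ :=
        peel t1 (Plow.erase q1) ht1perm ht1pw
          (by intro h; rw [h] at hP1len; simp at hP1len)
      obtain ⟨hmin2, hidx2, herase2, hq2pos⟩ := selRound B r2 q2 hub2
        (by rw [herase1]; exact hq2mem)
        (by rw [herase1]; exact hq2min)
      set r3 : List Int := r2.set q2.2.toNat B with hr3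
      have hub3 : ∀ y ∈ r3, y ≤ B := by
        intro y hy
        rcases List.mem_or_eq_of_mem_set hy with h | rfl
        · exact hub2 y h
        · exact le_refl B
      have hP2nil : (Plow.erase q1).erase q2 = [] := by
        apply List.eq_nil_of_length_eq_zero
        rw [List.length_erase_of_mem hq2mem]; omega
      have ht2nil : t2 = [] := by
        rw [hP2nil] at ht2perm
        exact ht2perm.eq_nil
      have hne3 : r3 ≠ [] := by
        have h3l : r3.length = r1.length := by
          rw [hr3, hr2, List.length_set, List.length_set]
        intro h
        apply hne1
        apply List.eq_nil_of_length_eq_zero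
        rw [← h3l, h]
        rfl
      obtain ⟨hmin3, hidx3, hset3⟩ := exhaustRound B r3 hne3 hub3
        (by rw [herase2, herase1, hP2nil])
      have hA : solution rank att
          = (q1.2.toNat : Int) * 10000 + (q2.2.toNat : Int) * 100 + 0 := by
        simp only [solution, hmax]
        rw [hmark, hmin1]
        simp only [Option.getD_some]
        rw [hidx1]
        simp only [Option.getD_some]
        rw [← hr2, hmin2]
        simp only [Option.getD_some]
        rw [hidx2]
        simp only [Option.getD_some]
        rw [← hr3, hmin3]
        simp only [Option.getD_some]
        rw [hidx3]
        simp only [Option.getD_some]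
        simp
      have hB' : solution_alt rank att = q1.2 * 10000 + q2.2 * 100 + 0 := by
        simp only [solution_alt]
        rw [hsorted, hs1, hs2, ht2nil]
        rw [PySem.List.slice_to _ (by norm_num : (0:Int) ≤ 3)]
        simp [PySem.List.pyRepeat_singleton, PySem.List.pyGet?, PySem.List.pyIdx?]
      rw [hA, hB', Int.toNat_of_nonneg hq1pos, Int.toNat_of_nonneg hq2pos]
    · by_cases h1 : Plow.length = 1
      · -- exactly one attendee
        obtain ⟨q1, t1, hs1, hq1mem, hq1min, ht1perm, ht1pw⟩ :=
          peel (PySem.List.sorted Plow (fun p => (toLex p : Int ×ₗ Int)) false) Plow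
            (PySem.List.sorted_perm Plow _ false) (PySem.List.sorted_pairwise Plow _)
            (by intro h; rw [h] at h1; simp at h1)
        obtain ⟨hmin1, hidx1, herase1, hq1pos⟩ := selRound B r1 q1 hub1 hq1mem hq1min
        set r2 : List Int := r1.set q1.2.toNat B with hr2
        have hub2 : ∀ y ∈ r2, y ≤ B := by
          intro y hy
          rcases List.mem_or_eq_of_mem_set hy with h | rfl
          · exact hub1 y h
          · exact le_refl B
        have hP1nil : Plow.erase q1 = [] := by
          apply List.eq_nil_of_length_eq_zero
          rw [List.length_erase_of_mem hq1mem]; omega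
        have ht1nil : t1 = [] := by
          rw [hP1nil] at ht1perm
          exact ht1perm.eq_nil
        have hne2 : r2 ≠ [] := by
          have h2l : r2.length = r1.length := by rw [hr2, List.length_set]
          intro h
          apply hne1
          apply List.eq_nil_of_length_eq_zero
          rw [← h2l, h]
          rfl
        obtain ⟨hmin2, hidx2, hset2⟩ := exhaustRound B r2 hne2 hub2
          (by rw [herase1, hP1nil])
        have hA : solution rank att = (q1.2.toNat : Int) * 10000 + 0 + 0 := by
          simp only [solution, hmax]
          rw [hmark, hmin1]
          simp only [Option.getD_some]
          rw [hidx1]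
          simp only [Option.getD_some]
          rw [← hr2, hmin2]
          simp only [Option.getD_some]
          rw [hidx2]
          simp only [Option.getD_some]
          rw [hset2, hmin2]
          simp only [Option.getD_some]
          rw [hidx2]
          simp only [Option.getD_some]
          simp
        have hB' : solution_alt rank att = q1.2 * 10000 + 0 + 0 := by
          simp only [solution_alt]
          rw [hsorted, hs1, ht1nil]
          rw [PySem.List.slice_to _ (by norm_num : (0:Int) ≤ 3)]
          simp [PySem.List.pyRepeat_singleton, PySem.List.pyGet?, PySem.List.pyIdx?]
        rw [hA, hB', Int.toNat_of_nonneg hq1pos]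
      · -- no attendee at all
        have h0 : Plow = [] := by
          apply List.eq_nil_of_length_eq_zero
          omega
        obtain ⟨hmin1, hidx1, hset1⟩ := exhaustRound B r1 hne1 hub1 (by rw [← hPlow, h0])
        have hA : solution rank att = 0 := by
          simp only [solution, hmax]
          rw [hmark, hmin1]
          simp only [Option.getD_some]
          rw [hidx1]
          simp only [Option.getD_some]
          rw [hset1, hmin1]
          simp only [Option.getD_some]
          rw [hidx1]
          simp only [Option.getD_some]
          rw [hset1, hmin1]
          simp only [Option.getD_some]
          rw [hidx1]
          simp only [Option.getD_some]
          simp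
        have hB' : solution_alt rank att = 0 := by
          simp only [solution_alt]
          rw [hsorted, h0]
          simp [PySem.List.sorted, PySem.List.slice, PySem.List.pyRepeat_singleton,
            PySem.List.pyGet?, PySem.List.pyIdx?]
        rw [hA, hB']

-- ===== VERDICT (by name: the statement is the Claim_ definition above) =====
theorem solution_spec : Claim_equal_solution := by
  intro rank attendance hdom hpre
  obtain ⟨h1, h2⟩ := hpre
  unfold Spec_solution
  exact main rank attendance h1 h2
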